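-- pv_equiv track=rewrite | github.com/cerebrumaize/leetcode | 656.coin.path/1.py | func
-- ===== SOURCE A (Python) =====
-- def func(A, B):
--     '''Solution function description'''
--     if len(A) <= 1: return A
--     if A[-1] == -1: return []
--     if len(A) <= B: return [A[0], A[-1]]
--     def helper(total, path, coins, pos, A, B):
--         if len(A) - pos <= B:
--             total.append((coins+A[-1], path+[len(A)-1]))
--             return
--         for i in range(pos, pos+B):
--             if A[i] == -1: continue
--             helper(total, path+[i], coins+A[i], i+1, A, B)
--     res = []
--     path = []
--     helper(res, path, 0, 0, A, B)
--     return min(res)[1]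
-- ===== SOURCE B (Python) =====
-- def func(A, B):
--     '''Solution function description'''
--     if len(A) <= 1: return A
--     if A[-1] == -1: return []
--     if len(A) <= B: return [A[0], A[-1]]
--     n = len(A)
--     # best[pos] = (min cost to reach the end from pos, lexicographically smallest
--     # such path of chosen indices), or None when no path exists from pos.
--     best = [None] * n
--     for pos in range(n - 1, -1, -1):
--         if n - pos <= B:
--             best[pos] = (A[-1], [n - 1])
--         else:
--             cur = None
--             for i in range(pos, pos + B):
--                 if A[i] == -1: continue
--                 nxt = best[i + 1]
--                 if nxt is None: continue
--                 cand = (A[i] + nxt[0], [i] + nxt[1])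
--                 if cur is None or cand < cur: cur = cand
--             best[pos] = cur
--     return best[0][1]
-- ===== Notes on version B (the rewrite author's own statement) =====
-- stated objective: alternative
-- what changed: A enumerates every feasible path by recursive DFS and takes min over the whole list of (cost, path) tuples; B instead fills a DP table from the right storing, per position, the minimal cost together with the lexicographically smallest path achieving it (intended as asymptotically faster, but a timing run could not confirm this because A does not finish on larger inputs).
-- outside the precondition, e.g. on func([0, -1, -1, 0], 1): A raises ValueError, B raises TypeError; on func([5, 7], 0): A raises ValueError, B raises TypeError
import Mathlib
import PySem

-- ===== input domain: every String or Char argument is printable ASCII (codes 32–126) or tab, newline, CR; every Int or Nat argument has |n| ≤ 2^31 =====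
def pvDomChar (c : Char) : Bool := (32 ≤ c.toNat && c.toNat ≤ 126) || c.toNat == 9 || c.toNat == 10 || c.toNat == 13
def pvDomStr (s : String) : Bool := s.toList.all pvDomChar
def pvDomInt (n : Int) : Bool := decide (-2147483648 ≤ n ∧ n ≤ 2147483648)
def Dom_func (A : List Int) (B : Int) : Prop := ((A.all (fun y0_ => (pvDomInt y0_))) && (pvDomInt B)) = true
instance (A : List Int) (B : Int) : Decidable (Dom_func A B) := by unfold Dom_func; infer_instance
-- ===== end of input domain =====

-- B replaces A's recursive DFS enumeration of all paths by a right-to-left DP table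
-- (min cost + lexicographically smallest path per position); same return value on Pre_.

-- ===== PORT A =====
-- helper(total, path, coins, pos): appends (cost, path) pairs for every full path.
-- fuel only makes the recursion structural; with fuel = len(A)+1 (as func passes) it never
-- runs out, since pos strictly increases on each nested call and never exceeds len(A)-1.
-- All A[i] reads are in range, so pyGetD is exact here.
def helperA (A : List Int) (B : Int) : Nat → List (Int × List Int) → List Int → Int → Int → List (Int × List Int)
  | 0, total, _, _, _ => total
  | fuel+1, total, path, coins, pos =>
    if (A.length : Int) - pos ≤ B then
      total ++ [(coins + PySem.List.pyGetD A (-1) 0, path ++ [(A.length : Int) - 1])]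
    else
      (PySem.List.pyRange pos (pos + B) 1).foldl
        (fun t i =>
          if PySem.List.pyGetD A i 0 = -1 then t
          else helperA A B fuel t (path ++ [i]) (coins + PySem.List.pyGetD A i 0) (i + 1))
        total

def func (A : List Int) (B : Int) : List Int :=
  if A.length ≤ 1 then A
  else if PySem.List.pyGetD A (-1) 0 = -1 then []
  else if (A.length : Int) ≤ B then [PySem.List.pyGetD A 0 0, PySem.List.pyGetD A (-1) 0]
  else
    match PySem.List.min2? (helperA A B (A.length + 1) [] [] 0 0) (fun r => r.1) (fun r => r.2) with
    | some m => m.2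
    | none => []    -- Python: min([]) raises ValueError; excluded by Pre_func

-- ===== PORT B =====
-- Python's '<' on (int, list-of-int) tuples
def pyPairLt (x c : Int × List Int) : Bool :=
  decide (x.1 < c.1) || (x.1 == c.1 && decide (x.2 < c.2))

-- best[pos] = cur is List.set (pos is always in [0, n)); best[i+1] and best[0] reads are in range.
def func_alt (A : List Int) (B : Int) : List Int :=
  if A.length ≤ 1 then A
  else if PySem.List.pyGetD A (-1) 0 = -1 then []
  else if (A.length : Int) ≤ B then [PySem.List.pyGetD A 0 0, PySem.List.pyGetD A (-1) 0]
  else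
    let n := A.length
    let best :=
      (PySem.List.pyRange ((n : Int) - 1) (-1) (-1)).foldl
        (fun best pos =>
          best.set pos.toNat
            (if (n : Int) - pos ≤ B then
               some (PySem.List.pyGetD A (-1) 0, [(n : Int) - 1])
             else
               (PySem.List.pyRange pos (pos + B) 1).foldl
                 (fun cur i =>
                   if PySem.List.pyGetD A i 0 = -1 then cur
                   else
                     match PySem.List.pyGetD best (i + 1) none with
                     | none => cur
                     | some nxt =>
                       match cur with
                       | none => some (PySem.List.pyGetD A i 0 + nxt.1, i :: nxt.2)
                       | some c =>
                         if pyPairLt (PySem.List.pyGetD A i 0 + nxt.1, i :: nxt.2) c then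
                           some (PySem.List.pyGetD A i 0 + nxt.1, i :: nxt.2)
                         else cur)
                 none))
        (List.replicate n none)
    match PySem.List.pyGetD best 0 none with
    | some r => r.2
    | none => []   -- Python: None[1] raises TypeError; excluded by Pre_func

-- ===== PRECONDITION & SPEC =====
-- Pre_func excludes exactly the inputs where the Python A raises (ValueError from min([])):
-- those where no path exists, i.e. B < 1 or some window of B consecutive entries more than B
-- positions from the end is all -1 (with len(A) ≥ 2, A[-1] ≠ -1, len(A) > B).
def Pre_func (A : List Int) (B : Int) : Prop :=
  A.length ≤ 1 ∨ A.getLastD 0 = -1 ∨ (A.length : Int) ≤ B ∨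
  (1 ≤ B ∧ ∀ j < A.length, (j : Int) + B < (A.length : Int) →
     ∃ k < A.length, j ≤ k ∧ (k : Int) < (j : Int) + B ∧ A.getD k 0 ≠ -1)
instance (A : List Int) (B : Int) : Decidable (Pre_func A B) := by unfold Pre_func; infer_instance

def pvWitness_func : List Int × Int := ([1, 2, 3], 1)

def Spec_func (A : List Int) (B : Int) (out : List Int) : Prop := out = func_alt A B
instance (A : List Int) (B : Int) (out : List Int) : Decidable (Spec_func A B out) := by unfold Spec_func; infer_instance

-- ===== CLAIM (what is proved, stated in full; the proofs are below) =====
def Claim_equal_func : Prop := ∀ (A : List Int) (B : Int), Dom_func A B → Pre_func A B → Spec_func A B (func A B)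

-- ===== LEMMAS AND PROOFS =====

-- the strict comparison min2? uses on (cost, path) pairs (Python's tuple '<')
def lt2 (x m : Int × List Int) : Bool :=
  decide (x.1 < m.1) || (!decide (m.1 < x.1) && decide (x.2 < m.2))

def mstep (acc : Option (Int × List Int)) (x : Int × List Int) : Option (Int × List Int) :=
  match acc with
  | none => some x
  | some m => if lt2 x m then some x else some m

def mergeMin (a b : Option (Int × List Int)) : Option (Int × List Int) :=
  match b with
  | none => a
  | some y => mstep a y

-- (cost, path) ↦ (k + cost, i :: path)
def shiftCP (k i : Int) (cp : Int × List Int) : Int × List Int := (k + cp.1, i :: cp.2)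

-- proof-side: the list of (cost, path) pairs A's helper enumerates from position pos
def pathsP (A : List Int) (B : Int) : Nat → Int → List (Int × List Int)
  | 0, _ => []
  | fuel+1, pos =>
    if (A.length : Int) - pos ≤ B then
      [(PySem.List.pyGetD A (-1) 0, [(A.length : Int) - 1])]
    else
      (PySem.List.pyRange pos (pos + B) 1).flatMap (fun i =>
        if PySem.List.pyGetD A i 0 = -1 then []
        else (pathsP A B fuel (i + 1)).map (shiftCP (PySem.List.pyGetD A i 0) i))

-- proof-side: the DP value at position pos
def bestP (A : List Int) (B : Int) : Nat → Int → Option (Int × List Int)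
  | 0, _ => none
  | fuel+1, pos =>
    if (A.length : Int) - pos ≤ B then
      some (PySem.List.pyGetD A (-1) 0, [(A.length : Int) - 1])
    else
      (PySem.List.pyRange pos (pos + B) 1).foldl
        (fun cur i =>
          if PySem.List.pyGetD A i 0 = -1 then cur
          else mergeMin cur ((bestP A B fuel (i + 1)).map (shiftCP (PySem.List.pyGetD A i 0) i)))
        none

theorem lt2_iff (x m : Int × List Int) : lt2 x m = true ↔ (x.1 < m.1 ∨ (x.1 = m.1 ∧ x.2 < m.2)) := by
  simp only [lt2, Bool.or_eq_true, Bool.and_eq_true, decide_eq_true_eq, Bool.not_eq_true',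
    decide_eq_false_iff_not, not_lt]
  constructor
  · rintro (h | ⟨h1, h2⟩)
    · exact Or.inl h
    · rcases lt_or_eq_of_le h1 with h | h
      · exact Or.inl h
      · exact Or.inr ⟨h, h2⟩
  · rintro (h | ⟨h1, h2⟩)
    · exact Or.inl h
    · exact Or.inr ⟨le_of_eq h1, h2⟩

theorem lt2_eq_false_iff (x m : Int × List Int) :
    lt2 x m = false ↔ (m.1 ≤ x.1 ∧ (x.1 = m.1 → m.2 ≤ x.2)) := by
  rw [Bool.eq_false_iff, Ne, lt2_iff]
  simp [not_or, not_lt]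

theorem pyPairLt_eq_lt2 (x m : Int × List Int) : pyPairLt x m = lt2 x m := by
  rcases lt_trichotomy x.1 m.1 with h | h | h
  · simp [pyPairLt, lt2, h]
  · simp [pyPairLt, lt2, h]
  · simp [pyPairLt, lt2, h, lt_asymm h, h.ne']

theorem lt2_shift (k i : Int) (a b : Int × List Int) :
    lt2 (shiftCP k i a) (shiftCP k i b) = lt2 a b := by
  rw [Bool.eq_iff_iff, lt2_iff, lt2_iff]
  simp [shiftCP]

theorem mergeMin_assoc (a b c : Option (Int × List Int)) :
    mergeMin (mergeMin a b) c = mergeMin a (mergeMin b c) := by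
  rcases c with _ | z
  · rfl
  rcases b with _ | y
  · rcases a with _ | m <;> rfl
  rcases a with _ | m
  · cases h : lt2 z y <;> simp [mergeMin, mstep, h]
  cases hym : lt2 y m <;> cases hzy : lt2 z y
  · -- ¬(y < m), ¬(z < y): z not below m either
    have hzm : lt2 z m = false := by
      rw [lt2_eq_false_iff] at hym hzy ⊢
      obtain ⟨h1, h2⟩ := hym
      obtain ⟨h3, h4⟩ := hzy
      refine ⟨le_trans h1 h3, fun he => ?_⟩
      have hy1 : y.1 = m.1 := le_antisymm (he ▸ h3) h1
      have hz1 : z.1 = y.1 := he.trans hy1.symm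
      exact le_trans (h2 hy1) (h4 hz1)
    simp [mergeMin, mstep, hym, hzy, hzm]
  · simp [mergeMin, mstep, hym, hzy]
  · simp [mergeMin, mstep, hym, hzy]
  · -- y < m and z < y: z below m by transitivity
    have hzm : lt2 z m = true := by
      rw [lt2_iff] at hym hzy ⊢
      rcases hym with h1 | ⟨h1, h1'⟩ <;> rcases hzy with h2 | ⟨h2, h2'⟩
      · exact Or.inl (lt_trans h2 h1)
      · exact Or.inl (h2 ▸ h1)
      · exact Or.inl (h1 ▸ h2)
      · exact Or.inr ⟨h2.trans h1, lt_trans h2' h1'⟩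
    simp [mergeMin, mstep, hym, hzy, hzm]

theorem foldl_mstep_acc (ys : List (Int × List Int)) :
    ∀ acc, ys.foldl mstep acc = mergeMin acc (ys.foldl mstep none) := by
  induction ys with
  | nil => intro acc; rfl
  | cons y ys ih =>
    intro acc
    rw [List.foldl_cons, List.foldl_cons, ih (mstep acc y), ih (mstep none y)]
    show mergeMin (mergeMin acc (some y)) (ys.foldl mstep none)
      = mergeMin acc (mergeMin (some y) (ys.foldl mstep none))
    exact mergeMin_assoc _ _ _

theorem min2?_eq_foldl (xs : List (Int × List Int)) :
    PySem.List.min2? xs (fun r => r.1) (fun r => r.2) = xs.foldl mstep none := by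
  unfold PySem.List.min2?
  congr 1
  funext acc x
  cases acc <;> rfl

theorem foldl_mstep_flatMap {α : Type} (g : α → List (Int × List Int)) (l : List α) :
    ∀ acc, (l.flatMap g).foldl mstep acc
      = l.foldl (fun a i => mergeMin a ((g i).foldl mstep none)) acc := by
  induction l with
  | nil => intro acc; rfl
  | cons x l ih =>
    intro acc
    rw [List.flatMap_cons, List.foldl_append, List.foldl_cons, ih, foldl_mstep_acc]

theorem foldl_mstep_map (k i : Int) (xs : List (Int × List Int)) :
    ∀ acc, (xs.map (shiftCP k i)).foldl mstep (acc.map (shiftCP k i))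
      = (xs.foldl mstep acc).map (shiftCP k i) := by
  induction xs with
  | nil => intro acc; rfl
  | cons x xs ih =>
    intro acc
    rw [List.map_cons, List.foldl_cons, List.foldl_cons]
    have h : mstep (acc.map (shiftCP k i)) (shiftCP k i x) = (mstep acc x).map (shiftCP k i) := by
      cases acc with
      | none => rfl
      | some m =>
        simp only [Option.map_some, mstep, lt2_shift]
        split <;> simp
    rw [h, ih]

theorem helperA_eq (A : List Int) (B : Int) :
    ∀ fuel pos total path coins,
      helperA A B fuel total path coins pos
        = total ++ (pathsP A B fuel pos).map (fun cp => (coins + cp.1, path ++ cp.2)) := by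
  intro fuel
  induction fuel with
  | zero => intro pos total path coins; simp [helperA, pathsP]
  | succ fuel ih =>
    intro pos total path coins
    rw [helperA, pathsP]
    by_cases hterm : (A.length : Int) - pos ≤ B
    · simp [hterm]
    · rw [if_neg hterm, if_neg hterm]
      have hb : (fun (t : List (Int × List Int)) (i : Int) =>
            if PySem.List.pyGetD A i 0 = -1 then t
            else helperA A B fuel t (path ++ [i]) (coins + PySem.List.pyGetD A i 0) (i + 1))
          = fun t i => t ++ ((if PySem.List.pyGetD A i 0 = -1 then []
              else (pathsP A B fuel (i + 1)).map
                (shiftCP (PySem.List.pyGetD A i 0) i)).map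
                  (fun cp => (coins + cp.1, path ++ cp.2))) := by
        funext t i
        by_cases hbad : PySem.List.pyGetD A i 0 = -1
        · simp [hbad]
        · rw [if_neg hbad, if_neg hbad, ih]
          simp [List.map_map, Function.comp, shiftCP, add_assoc]
      rw [hb, PySem.List.foldl_append_eq_flatMap, List.map_flatMap]

theorem min_pathsP_eq_bestP (A : List Int) (B : Int) :
    ∀ fuel pos, (pathsP A B fuel pos).foldl mstep none = bestP A B fuel pos := by
  intro fuel
  induction fuel with
  | zero => intro pos; rfl
  | succ fuel ih =>
    intro pos
    rw [pathsP, bestP]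
    by_cases hterm : (A.length : Int) - pos ≤ B
    · simp [hterm, mstep]
    · rw [if_neg hterm, if_neg hterm, foldl_mstep_flatMap]
      have hb : (fun (a : Option (Int × List Int)) (i : Int) =>
            mergeMin a ((if PySem.List.pyGetD A i 0 = -1 then []
              else (pathsP A B fuel (i + 1)).map
                (shiftCP (PySem.List.pyGetD A i 0) i)).foldl mstep none))
          = fun a i =>
            if PySem.List.pyGetD A i 0 = -1 then a
            else mergeMin a ((bestP A B fuel (i + 1)).map (shiftCP (PySem.List.pyGetD A i 0) i)) := by
        funext a i
        by_cases hbad : PySem.List.pyGetD A i 0 = -1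
        · simp [hbad, mergeMin]
        · rw [if_neg hbad, if_neg hbad]
          have := foldl_mstep_map (PySem.List.pyGetD A i 0) i (pathsP A B fuel (i + 1)) none
          simp only [Option.map_none] at this
          rw [this, ih]
      rw [hb]

theorem bestP_irrel (A : List Int) (B : Int) :
    ∀ f g : Nat, ∀ pos : Int, 0 ≤ pos → pos ≤ (A.length : Int) →
      (A.length : Int) - pos < (f : Int) → (A.length : Int) - pos < (g : Int) →
      bestP A B f pos = bestP A B g pos := by
  intro f
  induction f with
  | zero => intro g pos h0 hn hf hg; exfalso; push_cast at hf; omega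
  | succ f ihf =>
    intro g pos h0 hn hf hg
    cases g with
    | zero => exfalso; push_cast at hg; omega
    | succ g =>
      rw [bestP, bestP]
      by_cases hterm : (A.length : Int) - pos ≤ B
      · rw [if_pos hterm, if_pos hterm]
      · rw [if_neg hterm, if_neg hterm]
        apply PySem.List.foldl_congr_mem
        intro acc i hi
        rw [PySem.List.mem_pyRange_one] at hi
        by_cases hbad : PySem.List.pyGetD A i 0 = -1
        · simp [hbad]
        · rw [if_neg hbad, if_neg hbad,
            ihf g (i + 1) (by omega) (by push_cast at hf hg ⊢; omega)
              (by push_cast at hf ⊢; omega) (by push_cast at hg ⊢; omega)]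

theorem loopB (A : List Int) (Bv : Int) :
    ∀ (p : Nat) (best : List (Option (Int × List Int))),
      p ≤ A.length → best.length = A.length →
      (∀ k : Nat, p ≤ k → k < A.length →
        best.getD k none = bestP A Bv (A.length + 1) (k : Int)) →
      (fun res => res.length = A.length ∧ ∀ k : Nat, k < A.length →
          res.getD k none = bestP A Bv (A.length + 1) (k : Int))
        ((PySem.List.pyRange ((p : Int) - 1) (-1) (-1)).foldl
          (fun best pos =>
            best.set pos.toNat
              (if (A.length : Int) - pos ≤ Bv then
                 some (PySem.List.pyGetD A (-1) 0, [(A.length : Int) - 1])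
               else
                 (PySem.List.pyRange pos (pos + Bv) 1).foldl
                   (fun cur i =>
                     if PySem.List.pyGetD A i 0 = -1 then cur
                     else
                       match PySem.List.pyGetD best (i + 1) none with
                       | none => cur
                       | some nxt =>
                         match cur with
                         | none => some (PySem.List.pyGetD A i 0 + nxt.1, i :: nxt.2)
                         | some c =>
                           if pyPairLt (PySem.List.pyGetD A i 0 + nxt.1, i :: nxt.2) c then
                             some (PySem.List.pyGetD A i 0 + nxt.1, i :: nxt.2)
                           else cur)
                   none))
          best) := by
  intro p
  induction p with
  | zero =>
    intro best hp hlen hinv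
    rw [PySem.List.pyRange_neg_one_eq_nil (by norm_num)]
    exact ⟨hlen, fun k hk => hinv k (Nat.zero_le k) hk⟩
  | succ p ih =>
    intro best hp hlen hinv
    rw [show ((p + 1 : Nat) : Int) - 1 = (p : Int) by push_cast; ring]
    rw [PySem.List.pyRange_neg_one_cons (by omega), List.foldl_cons]
    apply ih _ (by omega) (by rw [List.length_set]; exact hlen)
    intro k hpk hkn
    rcases Nat.eq_or_lt_of_le hpk with hkp | hkp
    · -- k = p : the freshly written cell
      subst hkp
      have htn : ((p : Int)).toNat = p := Int.toNat_natCast p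
      have hplen : p < best.length := by omega
      rw [List.getD_eq_getElem?_getD, htn, List.getElem?_set, if_pos rfl, if_pos hplen]
      simp only [Option.getD_some]
      -- the written value equals bestP (A.length + 2) p, then drop the fuel by irrelevance
      have hfe : bestP A Bv (A.length + 1) (p : Int) = bestP A Bv (A.length + 2) (p : Int) := by
        apply bestP_irrel <;> push_cast <;> omega
      rw [hfe, show (A.length + 2) = (A.length + 1) + 1 from rfl, bestP]
      by_cases hterm : (A.length : Int) - (p : Int) ≤ Bv
      · rw [if_pos hterm, if_pos hterm]
      · rw [if_neg hterm, if_neg hterm]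
        apply PySem.List.foldl_congr_mem
        intro acc i hi
        rw [PySem.List.mem_pyRange_one] at hi
        by_cases hbad : PySem.List.pyGetD A i 0 = -1
        · simp [hbad]
        · rw [if_neg hbad, if_neg hbad]
          have hcast : i + 1 = ((i.toNat + 1 : Nat) : Int) := by omega
          have hread : PySem.List.pyGetD best (i + 1) none
              = bestP A Bv (A.length + 1) (i + 1) := by
            rw [hcast, PySem.List.pyGetD_natCast]
            exact hinv (i.toNat + 1) (by omega) (by omega)
          rw [hread]
          rcases hB : bestP A Bv (A.length + 1) (i + 1) with _ | nxt
          · simp [mergeMin]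
          · cases acc with
            | none => simp [mergeMin, mstep, shiftCP]
            | some c => simp [mergeMin, mstep, shiftCP, pyPairLt_eq_lt2]
    · -- k > p : untouched cell
      have hne : ((p : Int)).toNat ≠ k := by
        rw [Int.toNat_natCast]; omega
      rw [List.getD_eq_getElem?_getD, List.getElem?_set, if_neg hne,
        ← List.getD_eq_getElem?_getD]
      exact hinv k (by omega) hkn

theorem pyGetD_zero {α : Type} (xs : List α) (d : α) :
    PySem.List.pyGetD xs (0 : Int) d = xs.getD 0 d := by
  simpa using PySem.List.pyGetD_natCast xs 0 d

theorem func_spec : Claim_equal_func := by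
  intro A B _hdom _hpre
  unfold Spec_func func func_alt
  by_cases h1 : A.length ≤ 1
  · simp [h1]
  rw [if_neg h1, if_neg h1]
  by_cases h2 : PySem.List.pyGetD A (-1) 0 = -1
  · simp [h2]
  rw [if_neg h2, if_neg h2]
  by_cases h3 : (A.length : Int) ≤ B
  · simp [h3]
  rw [if_neg h3, if_neg h3]
  simp only []
  rw [min2?_eq_foldl, helperA_eq]
  simp only [List.nil_append, zero_add]
  rw [show ((pathsP A B (A.length + 1) 0).map (fun cp => (cp.1, cp.2)))
      = pathsP A B (A.length + 1) 0 by simp]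
  rw [min_pathsP_eq_bestP]
  have hloop := loopB A B A.length (List.replicate A.length none)
    (le_refl _) (List.length_replicate)
    (fun k hk hk' => absurd hk (by omega))
  obtain ⟨hlen, hval⟩ := hloop
  have h0 := hval 0 (by omega)
  simp only [Nat.cast_zero] at h0
  rw [pyGetD_zero, h0]
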